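-- pv_equiv track=rewrite | github.com/marekrams/tnac4o | otn2d/mps.py | _Dset
-- ===== SOURCE A (Python) =====
-- def _Dset(Dmax, d):
--     r"""Sets bond dimension to match maximal one and physical dimensions."""
--     L = len(d)
--     D = [1] * (L + 1)
--     for n in range(L):
--         D[n + 1] = min(D[n] * d[n], Dmax)
--     D[-1] = 1
--     for n in range(L - 1, -1, -1):
--         D[n] = min(D[n + 1] * d[n], Dmax, D[n])
--     return D
-- ===== SOURCE B (Python) =====
-- def _Dset(Dmax, d):
--     r"""Sets bond dimension to match maximal one and physical dimensions."""
--     stack = []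
--     f = 1
--     for x in d:
--         stack.append((x, f))
--         f = min(f * x, Dmax)
--     out = [1]
--     g = 1
--     while stack:
--         x, f = stack.pop()
--         g = min(g * x, Dmax, f)
--         out.append(g)
--     out.reverse()
--     return out
-- ===== Notes on version B (the rewrite author's own statement) =====
-- stated objective: alternative
-- what changed: A preallocates a shared (L+1)-array and mutates it in place with two index-range loops (the backward one re-reading its own partially overwritten slots); B uses no random-access array and no indices at all: one pass pushes (x, running_forward_value) pairs onto an explicit stack, then a while-loop pops the stack with two scalar accumulators and builds the output, which is reversed once at the end.
import Mathlib
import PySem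

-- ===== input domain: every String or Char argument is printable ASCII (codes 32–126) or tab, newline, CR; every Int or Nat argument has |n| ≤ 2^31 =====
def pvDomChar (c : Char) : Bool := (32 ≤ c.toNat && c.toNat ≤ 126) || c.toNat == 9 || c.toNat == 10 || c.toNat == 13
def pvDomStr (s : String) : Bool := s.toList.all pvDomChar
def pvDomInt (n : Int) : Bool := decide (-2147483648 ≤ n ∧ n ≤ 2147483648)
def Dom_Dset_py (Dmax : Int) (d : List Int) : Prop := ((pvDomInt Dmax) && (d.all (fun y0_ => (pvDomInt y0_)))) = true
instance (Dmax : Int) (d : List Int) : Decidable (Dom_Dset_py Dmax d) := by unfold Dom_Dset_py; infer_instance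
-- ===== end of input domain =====

-- B replaces A's preallocated array with its two index loops and in-place three-way-min overwrites
-- by an explicit stack of (x, forward-value) pairs popped with scalar accumulators; same O(n) cost.

-- ===== PORT A =====
def Dset_py (Dmax : Int) (d : List Int) : List Int :=
  let L : Int := (d.length : Int)
  let D0 : List Int := PySem.List.pyRepeat [1] (L + 1)
  let D1 : List Int := (PySem.List.pyRange 0 L 1).foldl
    (fun D n => PySem.List.pySetD D (n + 1)
      (min (PySem.List.pyGetD D n 0 * PySem.List.pyGetD d n 0) Dmax)) D0
  let D2 : List Int := PySem.List.pySetD D1 (-1) 1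
  (PySem.List.pyRange (L - 1) (-1) (-1)).foldl
    (fun D n => PySem.List.pySetD D n
      (min (PySem.List.pyGetD D (n + 1) 0 * PySem.List.pyGetD d n 0)
        (min Dmax (PySem.List.pyGetD D n 0)))) D2

-- ===== PORT B =====
-- the loop 'for x in d: stack.append((x, f)); f = min(f*x, Dmax)' as a foldl over d
def pushLoop (Dmax : Int) (d : List Int) : List (Int × Int) × Int :=
  d.foldl (fun (p : List (Int × Int) × Int) x => (p.1 ++ [(x, p.2)], min (p.2 * x) Dmax)) ([], 1)

-- 'while stack: x, f = stack.pop(); g = min(g*x, Dmax, f); out.append(g)':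
-- popping from the end of the stack = structural recursion over the reversed stack
def popScan (Dmax : Int) (g : Int) : List (Int × Int) → List Int
  | [] => []
  | (x, f) :: rest => min (min (g * x) Dmax) f :: popScan Dmax (min (min (g * x) Dmax) f) rest

def Dset_py_alt (Dmax : Int) (d : List Int) : List Int :=
  let stack := (pushLoop Dmax d).1
  let out := 1 :: popScan Dmax 1 stack.reverse
  out.reverse

-- ===== PRECONDITION & SPEC =====
-- no Pre_: the Python A returns normally on every input (both programs are total)
def Spec_Dset_py (Dmax : Int) (d : List Int) (out : List Int) : Prop := out = Dset_py_alt Dmax d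
instance (Dmax : Int) (d : List Int) (out : List Int) : Decidable (Spec_Dset_py Dmax d out) := by unfold Spec_Dset_py; infer_instance

-- ===== CLAIM (what is proved, stated in full; the proofs are below) =====
def Claim_equal_Dset_py : Prop := ∀ (Dmax : Int) (d : List Int), Dom_Dset_py Dmax d → Spec_Dset_py Dmax d (Dset_py Dmax d)

-- ===== LEMMAS AND PROOFS =====

-- forward capped prefix value F k
def fV (Dmax : Int) (d : List Int) (k : Nat) : Int :=
  (d.take k).foldl (fun a x => min (a * x) Dmax) 1

-- the value A's second pass leaves at slot k (fuel = L - k)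
def gRec (Dmax : Int) (d : List Int) : Nat → Nat → Int
  | 0, _ => 1
  | m + 1, k => min (gRec Dmax d m (k + 1) * d.getD k 0) (min Dmax (fV Dmax d k))

def gV (Dmax : Int) (d : List Int) (k : Nat) : Int := gRec Dmax d (d.length - k) k

theorem set_append_len {α : Type} (l₁ l₂ : List α) (x v : α) :
    (l₁ ++ x :: l₂).set l₁.length v = l₁ ++ v :: l₂ := by
  induction l₁ with
  | nil => rfl
  | cons y ys ih => simp [ih]

theorem fwd_loop (Dmax : Int) (d : List Int) :
    ∀ (m j : Nat), j + m = d.length →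
      (PySem.List.pyRange (j : Int) (d.length : Int) 1).foldl
        (fun D n => PySem.List.pySetD D (n + 1)
          (min (PySem.List.pyGetD D n 0 * PySem.List.pyGetD d n 0) Dmax))
        ((List.range (j + 1)).map (fV Dmax d) ++ List.replicate (d.length - j) 1)
      = (List.range (d.length + 1)).map (fV Dmax d) := by
  intro m
  induction m with
  | zero =>
    intro j hj
    obtain rfl : j = d.length := by omega
    rw [PySem.List.pyRange_one_eq_nil (le_refl _)]
    simp
  | succ m ih =>
    intro j hj
    have hjL : j < d.length := by omega
    have hjL' : (j : Int) < (d.length : Int) := by exact_mod_cast hjL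
    rw [PySem.List.pyRange_one_cons hjL']
    simp only [List.foldl_cons]
    have hcast : ((j : Int) + 1) = (((j + 1 : Nat)) : Int) := by push_cast; ring
    have hget : PySem.List.pyGetD
        ((List.range (j + 1)).map (fV Dmax d) ++ List.replicate (d.length - j) 1) (j : Int) 0
        = fV Dmax d j := by
      rw [PySem.List.pyGetD_natCast]
      rw [List.getD_eq_getElem _ _ (by simp; omega)]
      rw [List.getElem_append_left (by simp)]
      simp
    have hgetd : PySem.List.pyGetD d (j : Int) 0 = d.getD j 0 := by
      rw [PySem.List.pyGetD_natCast]
    have hrep : List.replicate (d.length - j) (1 : Int)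
        = 1 :: List.replicate (d.length - (j + 1)) 1 := by
      rw [show d.length - j = (d.length - (j + 1)) + 1 from by omega, List.replicate_succ]
    have hfs : fV Dmax d (j + 1) = min (fV Dmax d j * d.getD j 0) Dmax := by
      have h1 : d.take (j + 1) = d.take j ++ [d[j]] := by
        rw [List.take_add_one, List.getElem?_eq_getElem hjL]
        rfl
      unfold fV
      rw [h1, List.foldl_append, List.getD_eq_getElem _ _ hjL]
      rfl
    have hset : PySem.List.pySetD
        ((List.range (j + 1)).map (fV Dmax d) ++ List.replicate (d.length - j) 1)
        ((j : Int) + 1) (min (fV Dmax d j * d.getD j 0) Dmax)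
        = (List.range (j + 1 + 1)).map (fV Dmax d) ++ List.replicate (d.length - (j + 1)) 1 := by
      rw [hcast, PySem.List.pySetD_natCast, hrep]
      have h2 := set_append_len ((List.range (j + 1)).map (fV Dmax d))
        (List.replicate (d.length - (j + 1)) (1 : Int)) 1 (min (fV Dmax d j * d.getD j 0) Dmax)
      simp only [List.length_map, List.length_range] at h2
      rw [h2, List.range_succ (n := j + 1), List.map_append]
      rw [← hfs]
      simp
    rw [hget, hgetd, hset, hcast]
    exact ih (j + 1) (by omega)

theorem bwd_loop (Dmax : Int) (d : List Int) :
    ∀ (j : Nat), j ≤ d.length →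
      (PySem.List.pyRange ((j : Int) - 1) (-1) (-1)).foldl
        (fun D n => PySem.List.pySetD D n
          (min (PySem.List.pyGetD D (n + 1) 0 * PySem.List.pyGetD d n 0)
            (min Dmax (PySem.List.pyGetD D n 0))))
        ((List.range j).map (fV Dmax d) ++ (List.range (d.length + 1 - j)).map (fun i => gV Dmax d (j + i)))
      = (List.range (d.length + 1)).map (gV Dmax d) := by
  intro j
  induction j with
  | zero =>
    intro _
    rw [PySem.List.pyRange_neg_one_eq_nil (by norm_num)]
    simp
  | succ j ih =>
    intro hj
    have hjL : j < d.length := by omega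
    have hc1 : (((j + 1 : Nat)) : Int) - 1 = (j : Int) := by push_cast; ring
    rw [hc1, PySem.List.pyRange_neg_one_cons (by omega : (-1 : Int) < (j : Int))]
    simp only [List.foldl_cons]
    have hcast : ((j : Int) + 1) = (((j + 1 : Nat)) : Int) := by push_cast; ring
    have hL1 : d.length + 1 - (j + 1) = d.length - j := by omega
    have hget1 : PySem.List.pyGetD
        ((List.range (j + 1)).map (fV Dmax d)
          ++ (List.range (d.length + 1 - (j + 1))).map (fun i => gV Dmax d (j + 1 + i)))
        ((j : Int) + 1) 0 = gV Dmax d (j + 1) := by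
      rw [hcast, PySem.List.pyGetD_natCast]
      rw [List.getD_eq_getElem _ _ (by simp; omega)]
      rw [List.getElem_append_right (by simp)]
      simp
    have hget2 : PySem.List.pyGetD
        ((List.range (j + 1)).map (fV Dmax d)
          ++ (List.range (d.length + 1 - (j + 1))).map (fun i => gV Dmax d (j + 1 + i)))
        (j : Int) 0 = fV Dmax d j := by
      rw [PySem.List.pyGetD_natCast]
      rw [List.getD_eq_getElem _ _ (by simp; omega)]
      rw [List.getElem_append_left (by simp)]
      simp
    have hgetd : PySem.List.pyGetD d (j : Int) 0 = d.getD j 0 := by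
      rw [PySem.List.pyGetD_natCast]
    have hg : gV Dmax d j
        = min (gV Dmax d (j + 1) * d.getD j 0) (min Dmax (fV Dmax d j)) := by
      unfold gV
      rw [show d.length - j = (d.length - (j + 1)) + 1 from by omega]
      rfl
    have hset : PySem.List.pySetD
        ((List.range (j + 1)).map (fV Dmax d)
          ++ (List.range (d.length + 1 - (j + 1))).map (fun i => gV Dmax d (j + 1 + i)))
        (j : Int) (min (gV Dmax d (j + 1) * d.getD j 0) (min Dmax (fV Dmax d j)))
        = (List.range j).map (fV Dmax d)
          ++ (List.range (d.length + 1 - j)).map (fun i => gV Dmax d (j + i)) := by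
      rw [PySem.List.pySetD_natCast, ← hg]
      rw [List.range_succ (n := j), List.map_append, List.append_assoc]
      simp only [List.map_cons, List.map_nil, List.singleton_append]
      have h2 := set_append_len ((List.range j).map (fV Dmax d))
        ((List.range (d.length + 1 - (j + 1))).map (fun i => gV Dmax d (j + 1 + i)))
        (fV Dmax d j) (gV Dmax d j)
      simp only [List.length_map, List.length_range] at h2
      rw [h2]
      congr 1
      rw [show d.length + 1 - j = (d.length + 1 - (j + 1)) + 1 from by omega]
      rw [List.range_succ_eq_map, List.map_cons, List.map_map]
      congr 1
      refine List.map_congr_left ?_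
      intro i _
      simp only [Function.comp_apply]
      congr 1
      omega
    rw [hget1, hget2, hgetd, hset]
    exact ih (by omega)

theorem pySetD_neg_one (xs : List Int) (v : Int) (h : xs ≠ []) :
    PySem.List.pySetD xs (-1) v = xs.set (xs.length - 1) v := by
  have hl : 0 < xs.length := List.length_pos_iff.mpr h
  simp only [PySem.List.pySetD, PySem.List.pySet?, PySem.List.pyIdx?]
  rw [if_neg (by omega), if_pos (by omega : -((xs.length : Int)) ≤ -1)]
  simp

theorem A_eq_map (Dmax : Int) (d : List Int) :
    Dset_py Dmax d = (List.range (d.length + 1)).map (gV Dmax d) := by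
  simp only [Dset_py]
  have hfwd := fwd_loop Dmax d d.length 0 (by omega)
  norm_num at hfwd
  have h0 : PySem.List.pyRepeat ([1] : List Int) ((d.length : Int) + 1)
      = fV Dmax d 0 :: List.replicate d.length 1 := by
    rw [PySem.List.pyRepeat_singleton]
    rw [show (((d.length : Int)) + 1).toNat = d.length + 1 from by omega]
    simp [List.replicate_succ, fV]
  rw [h0, hfwd]
  have hne : (List.range (d.length + 1)).map (fV Dmax d) ≠ [] := by simp
  rw [pySetD_neg_one _ _ hne]
  have hlen : ((List.range (d.length + 1)).map (fV Dmax d)).length = d.length + 1 := by simp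
  rw [hlen]
  have hset : ((List.range (d.length + 1)).map (fV Dmax d)).set (d.length + 1 - 1) 1
      = (List.range d.length).map (fV Dmax d)
        ++ (List.range (d.length + 1 - d.length)).map (fun i => gV Dmax d (d.length + i)) := by
    rw [List.range_succ, List.map_append]
    have h2 := set_append_len ((List.range d.length).map (fV Dmax d)) ([] : List Int)
      (fV Dmax d d.length) 1
    simp only [List.length_map, List.length_range] at h2
    rw [show d.length + 1 - 1 = d.length from by omega]
    simp only [List.map_cons, List.map_nil] at h2 ⊢
    rw [h2]
    congr 1
    rw [show d.length + 1 - d.length = 1 from by omega]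
    simp [gV, gRec]
  rw [hset]
  exact bwd_loop Dmax d d.length (le_refl _)

-- characterization of the push loop: the stack pairs each d[k] with the forward value fV k
theorem pushLoop_go (Dmax : Int) :
    ∀ (xs : List Int) (s0 : List (Int × Int)) (a : Int),
      xs.foldl (fun (p : List (Int × Int) × Int) x => (p.1 ++ [(x, p.2)], min (p.2 * x) Dmax)) (s0, a)
        = (s0 ++ (List.range xs.length).map
            (fun k => (xs.getD k 0, (xs.take k).foldl (fun b x => min (b * x) Dmax) a)),
           xs.foldl (fun b x => min (b * x) Dmax) a) := by
  intro xs
  induction xs with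
  | nil => intro s0 a; simp
  | cons x xs ih =>
    intro s0 a
    simp only [List.foldl_cons]
    rw [ih]
    refine Prod.ext ?_ rfl
    simp only
    conv_rhs => rw [List.length_cons, List.range_succ_eq_map]
    rw [List.map_cons, List.map_map, List.append_assoc]
    simp only [List.take_zero, List.foldl_nil, List.getD_cons_zero, List.singleton_append]
    refine congrArg (fun t => s0 ++ (x, a) :: t) ?_
    refine List.map_congr_left ?_
    intro k _
    simp [Function.comp, List.take_succ_cons]

theorem pushLoop_eq (Dmax : Int) (d : List Int) :
    (pushLoop Dmax d).1 = (List.range d.length).map (fun k => (d.getD k 0, fV Dmax d k)) := by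
  unfold pushLoop
  rw [pushLoop_go]
  simp [fV]

-- the pop loop turns the reversed stack prefix into the backward values gV, back to front
theorem popScan_loop (Dmax : Int) (d : List Int) :
    ∀ (j : Nat), j ≤ d.length →
      popScan Dmax (gV Dmax d j)
        (((List.range j).map (fun k => (d.getD k 0, fV Dmax d k))).reverse)
      = ((List.range j).reverse).map (gV Dmax d) := by
  intro j
  induction j with
  | zero => intro _; simp [popScan]
  | succ j ih =>
    intro hj
    rw [List.range_succ, List.map_append, List.reverse_append]
    simp only [List.map_cons, List.map_nil, List.reverse_cons, List.reverse_nil,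
      List.nil_append, List.singleton_append]
    rw [popScan]
    have hg : min (min (gV Dmax d (j + 1) * d.getD j 0) Dmax) (fV Dmax d j) = gV Dmax d j := by
      have h1 : gV Dmax d j
          = min (gV Dmax d (j + 1) * d.getD j 0) (min Dmax (fV Dmax d j)) := by
        unfold gV
        rw [show d.length - j = (d.length - (j + 1)) + 1 from by omega]
        rfl
      rw [h1, min_assoc]
    rw [hg, ih (by omega)]
    simp [List.reverse_append]

theorem alt_eq_map (Dmax : Int) (d : List Int) :
    Dset_py_alt Dmax d = (List.range (d.length + 1)).map (gV Dmax d) := by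
  simp only [Dset_py_alt]
  rw [pushLoop_eq]
  have hgL : gV Dmax d d.length = 1 := by simp [gV, gRec]
  have h := popScan_loop Dmax d d.length (le_refl _)
  rw [hgL] at h
  rw [h, List.reverse_cons, ← List.map_reverse, List.reverse_reverse]
  rw [List.range_succ, List.map_append]
  simp [hgL]

-- ===== VERDICT (by name: the statement is the Claim_ definition above) =====
theorem Dset_py_spec : Claim_equal_Dset_py := by
  intro Dmax d _hDom
  unfold Spec_Dset_py
  rw [A_eq_map, alt_eq_map]
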